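-- pv_equiv track=rewrite | github.com/oneisnot/ruichangmj | test_scoring.py | check_seven_fairies
-- ===== SOURCE A (Python) =====
-- from collections import Counter
--
-- ZHONG = 27
--
-- def is_qing_yi_se(hand, melds):
--     all_tiles = hand + [m[1] for m in melds]
--     if any(t >= ZHONG for t in all_tiles):
--         return False
--     suits = set(t // 9 for t in all_tiles)
--     return len(suits) == 1
--
-- def is_seven_pairs(hand):
--     if len(hand) != 14:
--         return False
--     c = Counter(hand)
--     return all(count in (2, 4) for count in c.values())
--
-- def check_seven_fairies(hand):
--     """验证七仙女：极其苛刻的清一色顺连七对"""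
--     if not is_seven_pairs(hand):
--         return False
--     if not is_qing_yi_se(hand, []):
--         return False
--     t_set = sorted(list(set(hand)))
--     if len(t_set) != 7: return False
--
--     # 必须是一门连续的7个数字
--     suit = t_set[0] // 9
--     for t in t_set:
--         if t // 9 != suit: return False
--
--     start_val = t_set[0] % 9
--     end_val = t_set[-1] % 9
--     if end_val - start_val == 6 and len(t_set) == 7:
--         return True
--     return False
-- ===== SOURCE B (Python) =====
-- from collections import Counter
--
-- ZHONG = 27
--
-- def check_seven_fairies(hand):
--     """Seven fairies: 14 tiles forming 7 distinct pairs whose min..max span of 6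
--     pins a single run of 7 consecutive tiles inside one numbered suit."""
--     if len(hand) != 14:
--         return False
--     c = Counter(hand)
--     if any(v != 2 for v in c.values()):
--         return False
--     lo, hi = min(hand), max(hand)
--     return hi - lo == 6 and hi < ZHONG and lo // 9 == hi // 9
-- ===== Notes on version B (the rewrite author's own statement) =====
-- stated objective: simpler
-- what changed: Replaces the piecewise helper checks (seven-pairs with counts in {2,4}, suit-set cardinality, sorted distinct list, per-tile suit loop, modular endpoint arithmetic) by one direct characterization: every multiplicity is exactly 2 and min/max span 6 within one suit below ZHONG, with no sorting or set construction.
import Mathlib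
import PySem

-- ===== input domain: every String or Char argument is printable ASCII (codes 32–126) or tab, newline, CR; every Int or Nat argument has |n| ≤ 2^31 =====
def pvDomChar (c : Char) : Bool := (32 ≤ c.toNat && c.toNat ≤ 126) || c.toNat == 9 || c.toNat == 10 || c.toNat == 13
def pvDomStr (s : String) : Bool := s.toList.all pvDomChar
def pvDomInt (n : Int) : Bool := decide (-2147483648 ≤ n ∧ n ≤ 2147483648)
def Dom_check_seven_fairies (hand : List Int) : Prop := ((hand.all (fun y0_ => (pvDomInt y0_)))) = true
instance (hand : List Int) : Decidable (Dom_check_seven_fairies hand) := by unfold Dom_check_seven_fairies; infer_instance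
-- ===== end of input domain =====

-- B replaces A's piecewise helper checks (seven-pairs counts in {2,4}, suit-set size,
-- sorted distinct list, per-tile suit loop, modular endpoints) by one direct
-- characterization — every multiplicity is 2 and min/max span 6 within one suit below 27 —
-- for simplicity; same return value on every input (proved below).

-- ===== PORT A =====
-- Port of A. Every Python construct follows Source A step for step; `headI`/`getLastI`
-- stand for t_set[0]/t_set[-1], only evaluated behind the `len(t_set) == 7` guard
-- (so the list is nonempty exactly as in Python).
def is_qing_yi_se (hand : List Int) (melds : List (Int × Int)) : Bool :=
  let all_tiles := hand ++ melds.map (fun m => m.2)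
  if all_tiles.any (fun t => decide (t ≥ 27)) then false
  else
    let suits : PySem.Set Int := PySem.Set.ofList (all_tiles.map (fun t => PySem.Int.floordiv t 9))
    suits.length == 1

def is_seven_pairs (hand : List Int) : Bool :=
  if hand.length ≠ 14 then false
  else
    let c := PySem.Dict.counter hand
    c.values.all (fun count => count == 2 || count == 4)

def check_seven_fairies (hand : List Int) : Bool :=
  if !(is_seven_pairs hand) then false
  else if !(is_qing_yi_se hand []) then false
  else
    let t_set := PySem.List.sorted (PySem.Set.ofList hand) (fun x => x) false
    if t_set.length ≠ 7 then false
    else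
      let suit := PySem.Int.floordiv t_set.headI 9
      -- 'for t in t_set: if t // 9 != suit: return False'
      if t_set.any (fun t => !(PySem.Int.floordiv t 9 == suit)) then false
      else
        let start_val := PySem.Int.mod t_set.headI 9
        let end_val := PySem.Int.mod t_set.getLastI 9
        (end_val - start_val == 6) && (t_set.length == 7)

-- ===== PORT B =====
-- Port of B (Source B): one Counter pass, then the min/max span characterization;
-- min/max of the hand are only taken behind the `len(hand) == 14` guard.
def check_seven_fairies_alt (hand : List Int) : Bool :=
  if hand.length ≠ 14 then false
  else
    let c := PySem.Dict.counter hand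
    if c.values.any (fun v => !(v == 2)) then false
    else
      match PySem.List.min? hand (fun x => x), PySem.List.max? hand (fun x => x) with
      | some lo, some hi =>
          (hi - lo == 6) && (hi < 27) && (PySem.Int.floordiv lo 9 == PySem.Int.floordiv hi 9)
      | _, _ => false

-- ===== PRECONDITION & SPEC =====
def Spec_check_seven_fairies (hand : List Int) (out : Bool) : Prop := out = check_seven_fairies_alt hand
instance (hand : List Int) (out : Bool) : Decidable (Spec_check_seven_fairies hand out) := by unfold Spec_check_seven_fairies; infer_instance

-- ===== CLAIM (what is proved, stated in full; the proofs are below) =====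
def Claim_equal_check_seven_fairies : Prop := ∀ (hand : List Int), Dom_check_seven_fairies hand → Spec_check_seven_fairies hand (check_seven_fairies hand)

-- ===== LEMMAS AND PROOFS =====

-- values of Counter(l) are the counts of the distinct elements, in first-occurrence order
lemma pv_values_counter (l : List Int) :
    (PySem.Dict.counter l).values
      = (PySem.Set.ofList l).map (fun k => ((l.count k : Nat) : Int)) := by
  show ((PySem.Dict.counter l).items).map (fun p => p.2) = _
  rw [PySem.Dict.items_counter]
  simp

-- the counts of the distinct elements sum to the length
lemma pv_sum_counts (l : List Int) :
    ((PySem.Set.ofList l).map (fun k => l.count k)).sum = l.length := by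
  have hperm : (PySem.Set.ofList l).Perm l.dedup :=
    (List.perm_ext_iff_of_nodup (PySem.Set.nodup_ofList l) l.nodup_dedup).mpr
      (fun a => by simp [PySem.Set.mem_ofList, List.mem_dedup])
  rw [(hperm.map (fun k => l.count k)).sum_eq]
  exact List.sum_map_count_dedup_eq_length l

lemma pv_two_mul_le_sum (l : List Nat) (h : ∀ x ∈ l, 2 ≤ x) : 2 * l.length ≤ l.sum := by
  induction l with
  | nil => simp
  | cons a t ih =>
    have ha := h a (by simp)
    have := ih (fun x hx => h x (by simp [hx]))
    simp only [List.length_cons, List.sum_cons]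
    omega

lemma pv_all_two (l : List Nat) (h : ∀ x ∈ l, x = 2 ∨ x = 4)
    (hs : l.sum = 2 * l.length) : ∀ x ∈ l, x = 2 := by
  induction l with
  | nil => simp
  | cons a t ih =>
    have ha := h a (by simp)
    have hle := pv_two_mul_le_sum t (fun x hx => by rcases h x (by simp [hx]) with h' | h' <;> omega)
    simp only [List.sum_cons, List.length_cons] at hs
    intro x hx
    rcases List.mem_cons.mp hx with rfl | hx'
    · omega
    · exact ih (fun y hy => h y (by simp [hy])) (by omega) x hx'

lemma pv_fd_mono {a b : Int} (h : a ≤ b) :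
    PySem.Int.floordiv a 9 ≤ PySem.Int.floordiv b 9 := by
  rw [PySem.Int.floordiv_eq_ediv_of_pos (by norm_num),
      PySem.Int.floordiv_eq_ediv_of_pos (by norm_num)]
  exact Int.ediv_le_ediv (by norm_num) h

lemma pv_nodup_const_len {α : Type} {l : List α} {a : α}
    (hd : l.Nodup) (h : ∀ x ∈ l, x = a) : l.length ≤ 1 := by
  match l with
  | [] => simp
  | [x] => simp
  | x :: y :: t =>
    have hx := h x (by simp)
    have hy := h y (by simp)
    subst hx; rw [hy] at hd; simp at hd

lemma pv_headI_getElem (l : List Int) (h : 0 < l.length) : l.headI = l[0]'h := by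
  cases l with
  | nil => simp at h
  | cons a s => rfl

lemma pv_getLastI_getElem (l : List Int) (h : 0 < l.length) :
    l.getLastI = l[l.length - 1]'(by omega) := by
  rw [List.getLastI_eq_getLast?_getD, List.getLast?_eq_getElem?,
      List.getElem?_eq_getElem (by omega)]
  rfl

-- head / last of an id-sorted list bound every element
lemma pv_sorted_headI_min (xs : List Int)
    (h : PySem.List.sorted xs (fun x => x) false ≠ []) :
    ∀ y ∈ PySem.List.sorted xs (fun x => x) false,
      (PySem.List.sorted xs (fun x => x) false).headI ≤ y := by
  intro y hy
  obtain ⟨j, hj, rfl⟩ := List.mem_iff_getElem.mp hy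
  rw [pv_headI_getElem _ (List.length_pos_of_ne_nil h)]
  exact PySem.List.sorted_id_getElem_mono _ (Nat.zero_le j) hj

lemma pv_sorted_getLastI_max (xs : List Int)
    (h : PySem.List.sorted xs (fun x => x) false ≠ []) :
    ∀ y ∈ PySem.List.sorted xs (fun x => x) false,
      y ≤ (PySem.List.sorted xs (fun x => x) false).getLastI := by
  intro y hy
  obtain ⟨j, hj, rfl⟩ := List.mem_iff_getElem.mp hy
  have hpos : 0 < (PySem.List.sorted xs (fun x => x) false).length :=
    List.length_pos_of_ne_nil h
  rw [pv_getLastI_getElem _ hpos]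
  exact PySem.List.sorted_id_getElem_mono _ (by omega) (by omega)

lemma pv_main (hand : List Int) :
    check_seven_fairies hand = check_seven_fairies_alt hand := by
  by_cases h14 : hand.length = 14
  case neg =>
    simp [check_seven_fairies, check_seven_fairies_alt, is_seven_pairs, h14]
  case pos =>
    have hne : hand ≠ [] := by intro h; rw [h] at h14; simp at h14
    obtain ⟨lo, hmin⟩ : ∃ lo, PySem.List.min? hand (fun x => x) = some lo := by
      cases h : PySem.List.min? hand (fun x => x) with
      | none => exact absurd ((PySem.List.min?_eq_none_iff _ _).mp h) hne
      | some m => exact ⟨m, rfl⟩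
    obtain ⟨hi, hmax⟩ : ∃ hi, PySem.List.max? hand (fun x => x) = some hi := by
      cases h : PySem.List.max? hand (fun x => x) with
      | none => exact absurd ((PySem.List.max?_eq_none_iff _ _).mp h) hne
      | some m => exact ⟨m, rfl⟩
    have hlo_mem : lo ∈ hand := PySem.List.min?_mem hmin
    have hhi_mem : hi ∈ hand := PySem.List.max?_mem hmax
    have hlo_min : ∀ y ∈ hand, lo ≤ y := PySem.List.min?_isMin hmin
    have hhi_max : ∀ y ∈ hand, y ≤ hi := PySem.List.max?_isMax hmax
    have hmemS : ∀ x, x ∈ PySem.Set.ofList hand ↔ x ∈ hand :=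
      fun x => PySem.Set.mem_ofList hand x
    have htperm : (PySem.List.sorted (PySem.Set.ofList hand) (fun x => x) false).Perm
        (PySem.Set.ofList hand) := PySem.List.sorted_perm _ _ _
    have hmemt : ∀ x, x ∈ PySem.List.sorted (PySem.Set.ofList hand) (fun x => x) false ↔ x ∈ hand :=
      fun x => by rw [htperm.mem_iff, hmemS]
    have htlen : (PySem.List.sorted (PySem.Set.ofList hand) (fun x => x) false).length
        = (PySem.Set.ofList hand).length := htperm.length_eq
    have hBeq : check_seven_fairies_alt hand =
        (if ((PySem.Dict.counter hand).values.any (fun v => !(v == 2))) then false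
         else ((hi - lo == 6) && (decide (hi < 27)) && (PySem.Int.floordiv lo 9 == PySem.Int.floordiv hi 9))) := by
      simp [check_seven_fairies_alt, h14, hmin, hmax]
    by_cases hall2 : ∀ k ∈ hand, hand.count k = 2
    case pos =>
      have hany_false : (PySem.Dict.counter hand).values.any (fun v => !(v == 2)) = false := by
        rw [pv_values_counter]
        simp only [List.any_map, List.any_eq_false]
        intro k hk
        simp [hall2 k ((hmemS k).mp hk)]
      have hS7 : (PySem.Set.ofList hand).length = 7 := by
        have hsum := pv_sum_counts hand
        have hconst : (PySem.Set.ofList hand).map (fun k => hand.count k)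
            = (PySem.Set.ofList hand).map (fun _ => 2) :=
          List.map_congr_left (fun k hk => hall2 k ((hmemS k).mp hk))
        rw [hconst, h14] at hsum
        simp at hsum
        omega
      have htlen7 : (PySem.List.sorted (PySem.Set.ofList hand) (fun x => x) false).length = 7 := by
        rw [htlen, hS7]
      have htne : (PySem.List.sorted (PySem.Set.ofList hand) (fun x => x) false) ≠ [] := by
        intro h; rw [h] at htlen7; simp at htlen7
      have hsp_true : is_seven_pairs hand = true := by
        rw [is_seven_pairs]
        simp only [h14, ne_eq, not_true_eq_false, if_false]
        rw [pv_values_counter]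
        simp only [List.all_map, List.all_eq_true]
        intro k hk
        simp [hall2 k ((hmemS k).mp hk)]
      have hthead : (PySem.List.sorted (PySem.Set.ofList hand) (fun x => x) false).headI = lo := by
        have hh : (PySem.List.sorted (PySem.Set.ofList hand) (fun x => x) false).headI
            ∈ PySem.List.sorted (PySem.Set.ofList hand) (fun x => x) false := by
          rw [pv_headI_getElem _ (List.length_pos_of_ne_nil htne)]
          exact List.getElem_mem _
        have h1 := pv_sorted_headI_min _ htne lo ((hmemt lo).mpr hlo_mem)
        have h2 := hlo_min _ ((hmemt _).mp hh)
        omega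
      have htlast : (PySem.List.sorted (PySem.Set.ofList hand) (fun x => x) false).getLastI = hi := by
        have hh : (PySem.List.sorted (PySem.Set.ofList hand) (fun x => x) false).getLastI
            ∈ PySem.List.sorted (PySem.Set.ofList hand) (fun x => x) false := by
          rw [pv_getLastI_getElem _ (List.length_pos_of_ne_nil htne)]
          exact List.getElem_mem _
        have h1 := pv_sorted_getLastI_max _ htne hi ((hmemt hi).mpr hhi_mem)
        have h2 := hhi_max _ ((hmemt _).mp hh)
        omega
      have hmodlo := PySem.Int.floordiv_mul_add_mod lo 9
      have hmodhi := PySem.Int.floordiv_mul_add_mod hi 9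
      by_cases hB : hi - lo = 6 ∧ hi < 27 ∧ PySem.Int.floordiv lo 9 = PySem.Int.floordiv hi 9
      case pos =>
        obtain ⟨hspan, h27, hsuit⟩ := hB
        have hsuit_all : ∀ u ∈ hand, PySem.Int.floordiv u 9 = PySem.Int.floordiv lo 9 := by
          intro u hu
          have h1 := pv_fd_mono (hlo_min u hu)
          have h2 := pv_fd_mono (hhi_max u hu)
          omega
        have hq_true : is_qing_yi_se hand [] = true := by
          rw [is_qing_yi_se]
          simp only [List.map_nil, List.append_nil]
          have hno27 : hand.any (fun t => decide (t ≥ 27)) = false := by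
            simp only [List.any_eq_false, decide_eq_true_eq]
            intro u hu
            have := hhi_max u hu
            simp; omega
          rw [if_neg (by rw [hno27]; simp)]
          have hconst : ∀ x ∈ PySem.Set.ofList (hand.map (fun t => PySem.Int.floordiv t 9)),
              x = PySem.Int.floordiv lo 9 := by
            intro x hx
            obtain ⟨u, hu, rfl⟩ := List.mem_map.mp ((PySem.Set.mem_ofList _ x).mp hx)
            exact hsuit_all u hu
          have hle := pv_nodup_const_len (PySem.Set.nodup_ofList _) hconst
          have hge : 0 < (PySem.Set.ofList (hand.map (fun t => PySem.Int.floordiv t 9))).length :=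
            List.length_pos_of_mem ((PySem.Set.mem_ofList _ _).mpr
              (List.mem_map.mpr ⟨lo, hlo_mem, rfl⟩))
          simp only [beq_iff_eq]
          omega
        rw [hBeq, if_neg (by rw [hany_false]; simp)]
        rw [check_seven_fairies]
        simp only [hsp_true, hq_true, Bool.not_true, Bool.false_eq_true, if_false, htlen7,
          ne_eq, not_true_eq_false, hthead, htlast]
        rw [if_neg (by
          rw [Bool.not_eq_true]
          simp only [List.any_eq_false]
          intro u hu
          rw [hsuit_all u ((hmemt u).mp hu)]
          simp)]
        have h1 : (PySem.Int.mod hi 9 - PySem.Int.mod lo 9 == 6 && 7 == 7) = true := by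
          simp only [Bool.and_eq_true, beq_iff_eq]
          exact ⟨by omega, by decide⟩
        have h2 : (hi - lo == 6 && decide (hi < 27) &&
            PySem.Int.floordiv lo 9 == PySem.Int.floordiv hi 9) = true := by
          simp only [Bool.and_eq_true, beq_iff_eq, decide_eq_true_eq]
          exact ⟨⟨by omega, h27⟩, hsuit⟩
        rw [h1, h2]
      case neg =>
        have hcond : ((hi - lo == 6) && (decide (hi < 27)) &&
            (PySem.Int.floordiv lo 9 == PySem.Int.floordiv hi 9)) = false := by
          by_contra hc
          rw [Bool.not_eq_false] at hc
          simp only [Bool.and_eq_true, beq_iff_eq, decide_eq_true_eq] at hc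
          exact hB ⟨hc.1.1, hc.1.2, hc.2⟩
        have hBfalse : check_seven_fairies_alt hand = false := by
          rw [hBeq, if_neg (by rw [hany_false]; simp), hcond]
        rw [hBfalse]
        cases hA : check_seven_fairies hand with
        | false => rfl
        | true =>
          exfalso
          rw [check_seven_fairies] at hA
          simp only [hsp_true, Bool.not_true, Bool.false_eq_true, if_false] at hA
          cases hq : is_qing_yi_se hand [] with
          | false => rw [hq] at hA; simp at hA
          | true =>
            rw [hq] at hA
            simp only [Bool.not_true, Bool.false_eq_true, if_false, htlen7,
              ne_eq, not_true_eq_false] at hA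
            have h27 : hi < 27 := by
              rw [is_qing_yi_se] at hq
              simp only [List.map_nil, List.append_nil] at hq
              cases h27' : hand.any (fun t => decide (t ≥ 27)) with
              | true => rw [if_pos (by rw [h27'])] at hq; simp at hq
              | false =>
                have := List.any_eq_false.mp h27' hi hhi_mem
                simp at this
                omega
            have hsuit : PySem.Int.floordiv lo 9 = PySem.Int.floordiv hi 9 := by
              rw [is_qing_yi_se] at hq
              simp only [List.map_nil, List.append_nil] at hq
              rw [if_neg] at hq
              · have hlen1 : (PySem.Set.ofList (hand.map (fun t => PySem.Int.floordiv t 9))).length = 1 := by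
                  simpa using hq
                obtain ⟨a, ha⟩ := List.length_eq_one_iff.mp hlen1
                have h1 : PySem.Int.floordiv lo 9 ∈ [a] := by
                  rw [← ha]
                  exact (PySem.Set.mem_ofList _ _).mpr (List.mem_map.mpr ⟨lo, hlo_mem, rfl⟩)
                have h2 : PySem.Int.floordiv hi 9 ∈ [a] := by
                  rw [← ha]
                  exact (PySem.Set.mem_ofList _ _).mpr (List.mem_map.mpr ⟨hi, hhi_mem, rfl⟩)
                simp only [List.mem_singleton] at h1 h2
                rw [h1, h2]
              · intro hc
                obtain ⟨u, hu, hu27⟩ := List.any_eq_true.mp hc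
                have hle := hhi_max u hu
                simp at hu27
                omega
            by_cases hl : (PySem.List.sorted (PySem.Set.ofList hand) (fun x => x) false).any
                (fun t => !(PySem.Int.floordiv t 9 ==
                  PySem.Int.floordiv (PySem.List.sorted (PySem.Set.ofList hand) (fun x => x) false).headI 9)) = true
            · rw [if_pos (by rw [hl])] at hA; simp at hA
            · rw [if_neg (by rw [Bool.not_eq_true] at hl; rw [hl]; simp)] at hA
              simp only [hthead, htlast, Bool.and_eq_true, beq_iff_eq] at hA
              exact hB ⟨by omega, h27, hsuit⟩
    case neg =>
      push Not at hall2
      obtain ⟨k, hk_mem, hk_ne⟩ := hall2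
      have hany_true : (PySem.Dict.counter hand).values.any (fun v => !(v == 2)) = true := by
        rw [pv_values_counter]
        simp only [List.any_map, List.any_eq_true]
        refine ⟨k, (hmemS k).mpr hk_mem, ?_⟩
        simp only [Function.comp, Bool.not_eq_true', beq_eq_false_iff_ne, ne_eq]
        intro hc
        exact hk_ne (by exact_mod_cast hc)
      have hBfalse : check_seven_fairies_alt hand = false := by
        rw [hBeq, hany_true]; rfl
      rw [hBfalse]
      by_cases h24 : ∀ u ∈ hand, hand.count u = 2 ∨ hand.count u = 4
      case pos =>
        have hS_ne7 : (PySem.Set.ofList hand).length ≠ 7 := by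
          intro hS7
          have hsum := pv_sum_counts hand
          rw [h14] at hsum
          have hall := pv_all_two ((PySem.Set.ofList hand).map (fun k => hand.count k))
            (by intro x hx
                obtain ⟨u, hu, rfl⟩ := List.mem_map.mp hx
                exact h24 u ((hmemS u).mp hu))
            (by rw [hsum]; simp [hS7])
          exact hk_ne (hall (hand.count k) (List.mem_map.mpr ⟨k, (hmemS k).mpr hk_mem, rfl⟩))
        cases hsp : is_seven_pairs hand with
        | false => rw [check_seven_fairies]; simp [hsp]
        | true =>
          cases hq : is_qing_yi_se hand [] with
          | false => rw [check_seven_fairies]; simp [hsp, hq]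
          | true =>
            rw [check_seven_fairies]
            simp only [hsp, hq, Bool.not_true, Bool.false_eq_true, if_false]
            rw [if_pos (by rw [htlen]; exact hS_ne7)]
      case neg =>
        push Not at h24
        obtain ⟨u, hu_mem, hu1, hu2⟩ := h24
        have hsp : is_seven_pairs hand = false := by
          rw [is_seven_pairs]
          simp only [h14, ne_eq, not_true_eq_false, if_false]
          rw [pv_values_counter]
          simp only [List.all_map, List.all_eq_false]
          refine ⟨u, (hmemS u).mpr hu_mem, ?_⟩
          simp only [Function.comp, Bool.or_eq_true, beq_iff_eq, not_or]
          constructor <;> intro hc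
          · exact hu1 (by exact_mod_cast hc)
          · exact hu2 (by exact_mod_cast hc)
        rw [check_seven_fairies]; simp [hsp]

-- ===== VERDICT (by name: the statement is the Claim_ definition above) =====
theorem check_seven_fairies_spec : Claim_equal_check_seven_fairies := by
  intro hand _
  show check_seven_fairies hand = check_seven_fairies_alt hand
  exact pv_main hand
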